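-- pv_equiv track=rewrite | github.com/abc4571998/2022_DataScience | Assignment2/main.py | find_label_count
-- ===== SOURCE A (Python) =====
-- def find_label_count(split_list):
--     label_count = {}
--     for sl in split_list:
--         if sl[-1] in label_count:
--             label_count[sl[-1]] += 1
--         else:
--             label_count[sl[-1]] = 1
--     return [l for l in label_count.values()]
-- ===== SOURCE B (Python) =====
-- def find_label_count(split_list):
--     labels = dict.fromkeys(sl[-1] for sl in split_list)
--     return [sum(1 for sl in split_list if sl[-1] == lab) for lab in labels]
-- ===== Notes on version B (the rewrite author's own statement) =====
-- stated objective: alternative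
-- what changed: B first collects the distinct last elements in first-appearance order (dict.fromkeys) and then counts each label by a separate full scan, instead of maintaining a running counting dict in one pass.
import Mathlib
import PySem

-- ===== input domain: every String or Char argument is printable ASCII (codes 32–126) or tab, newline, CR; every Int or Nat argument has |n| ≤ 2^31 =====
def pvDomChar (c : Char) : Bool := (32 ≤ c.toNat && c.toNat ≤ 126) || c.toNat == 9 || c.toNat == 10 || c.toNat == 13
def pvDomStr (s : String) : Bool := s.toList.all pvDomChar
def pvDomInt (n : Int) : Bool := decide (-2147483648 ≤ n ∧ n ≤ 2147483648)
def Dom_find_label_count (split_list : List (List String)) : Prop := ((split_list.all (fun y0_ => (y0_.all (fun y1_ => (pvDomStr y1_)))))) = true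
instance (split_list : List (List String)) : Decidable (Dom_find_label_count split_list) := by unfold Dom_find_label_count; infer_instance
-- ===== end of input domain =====

-- B collects the distinct last elements in first-appearance order, then counts each by a
-- separate full scan, instead of A's single-pass counting dict (objective: alternative).


-- ===== PORT A =====
def find_label_count (split_list : List (List String)) : List Int :=
  (split_list.foldl (fun d sl =>
      let k := PySem.List.pyGetD sl (-1) ""
      if d.contains k then d.insert k (d.getD k 0 + 1)
      else d.insert k 1) PySem.Dict.empty).values

-- ===== PORT B =====
def find_label_count_alt (split_list : List (List String)) : List Int :=
  let labels : PySem.Set String :=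
    split_list.foldl (fun s sl => PySem.Set.add s (PySem.List.pyGetD sl (-1) "")) []
  labels.map (fun lab =>
    ((split_list.countP (fun sl => PySem.List.pyGetD sl (-1) "" == lab)) : Int))

-- ===== PRECONDITION & SPEC =====
-- Pre_ excludes inputs containing an empty row: there A raises IndexError on sl[-1].
def Pre_find_label_count (split_list : List (List String)) : Prop :=
  ∀ sl ∈ split_list, sl ≠ []
instance (split_list : List (List String)) : Decidable (Pre_find_label_count split_list) := by
  unfold Pre_find_label_count; infer_instance
def pvWitness_find_label_count : List (List String) :=
  [["a", "x"], ["b", "x"], ["y"]]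
def Spec_find_label_count (split_list : List (List String)) (out : List Int) : Prop :=
  out = find_label_count_alt split_list
instance (split_list : List (List String)) (out : List Int) : Decidable (Spec_find_label_count split_list out) := by
  unfold Spec_find_label_count; infer_instance

-- ===== CLAIM =====
def Claim_equal_find_label_count : Prop :=
  ∀ (split_list : List (List String)), Dom_find_label_count split_list →
    Pre_find_label_count split_list →
    Spec_find_label_count split_list (find_label_count split_list)

-- ===== LEMMAS AND PROOFS =====
-- A's branching update is the counter update.
lemma step_eq_counter_step (d : PySem.Dict String Int) (k : String) :
    (if d.contains k then d.insert k (d.getD k 0 + 1) else d.insert k 1)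
      = d.insert k (d.getD k 0 + 1) := by
  by_cases h : d.contains k = true
  · simp [h]
  · have h' : d.contains k = false := by simpa using h
    rw [PySem.Dict.getD_of_not_contains (h := h')]
    simp [h']

-- ===== VERDICT =====
theorem find_label_count_spec : Claim_equal_find_label_count := by
  intro split_list _ _
  unfold Spec_find_label_count find_label_count find_label_count_alt
  set key := fun sl : List String => PySem.List.pyGetD sl (-1) "" with hkey
  have hA : split_list.foldl (fun d sl =>
        let k := key sl
        if d.contains k then d.insert k (d.getD k 0 + 1) else d.insert k 1)
        PySem.Dict.empty
      = PySem.Dict.counter (split_list.map key) := by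
    rw [← PySem.Dict.foldl_insert_getD_add_one_eq_counter, List.foldl_map]
    congr 1
    funext d sl
    exact step_eq_counter_step d (key sl)
  rw [hA]
  have hB : split_list.foldl (fun s sl => PySem.Set.add s (key sl)) ([] : PySem.Set String)
      = PySem.Set.ofList (split_list.map key) := by
    rw [← PySem.Set.update_map_eq_foldl_add, PySem.Set.update_nil_left]
  rw [hB]
  simp only [PySem.Dict.values, PySem.Dict.items_counter, List.map_map]
  refine List.map_congr_left (fun k _ => ?_) |>.symm
  simp [hkey, List.count, List.countP_map, Function.comp_def]
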